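-- pv_equiv track=rewrite | github.com/jaeyo03/CodingTest | Sort/programmers_152995.py | solution
-- ===== SOURCE A (Python) =====
-- def solution(scores):
--     answer = 0
--     # Add index to each score to keep track of original positions
--     indexed_scores = [(i, score[0], score[1]) for i, score in enumerate(scores)]
--     # Sort by work_attitude_score decreasing, then by peer_evaluation_score increasing
--     indexed_scores.sort(key=lambda x: (-x[1], x[2]))
--
--     max_peer_evaluation = 0
--     eliminated = set()
--     for idx, work_attitude, peer_evaluation in indexed_scores:
--         '''
--         위에서 근무 태도 기준으로 정렬하면 동료 평가 점수가 max보다 낮은 사람은 근무 태도 점수는 무조건 낮고,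
--         동료 평가 점수도 낮은게 보장되므로 등수 산정에서 제외 가능
--         '''
--         if peer_evaluation < max_peer_evaluation:
--             eliminated.add(idx)
--         else:
--             max_peer_evaluation = max(max_peer_evaluation, peer_evaluation)
--     # Check if Wanho is eliminated
--     if 0 in eliminated:
--         return -1
--     # Prepare list of eligible employees with their total scores
--     eligible_scores = []
--     for idx, work_attitude, peer_evaluation in indexed_scores:
--         if idx not in eliminated:
--             total = work_attitude + peer_evaluation
--             eligible_scores.append((idx, total))
--     # Sort eligible employees by total score decreasing
--     eligible_scores.sort(key=lambda x: -x[1])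
--     # Assign ranks
--     rank = 0
--     same_rank_count = 0
--     prev_total = None
--     for i, (idx, total) in enumerate(eligible_scores):
--         if total != prev_total:
--             rank += same_rank_count + 1
--             same_rank_count = 0
--         else:
--             same_rank_count += 1
--         if idx == 0:
--             answer = rank
--             break
--         prev_total = total
--     return answer
-- ===== SOURCE B (Python) =====
-- def solution(scores):
--     # Simpler decomposition: one pass over the Pareto-sorted list builds the survivor
--     # totals directly (early -1 when Wanho is eliminated), then Wanho's competition
--     # rank is 1 + the number of survivors with a strictly greater total -- no second
--     # sort and no rank/same_rank bookkeeping loop.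
--     order = sorted(((i, s[0], s[1]) for i, s in enumerate(scores)),
--                    key=lambda x: (-x[1], x[2]))
--     max_peer = 0
--     survivors = []
--     for idx, work, peer in order:
--         if peer < max_peer:
--             if idx == 0:
--                 return -1
--         else:
--             max_peer = max(max_peer, peer)
--             survivors.append((idx, work + peer))
--     wanho = scores[0][0] + scores[0][1]
--     return 1 + sum(1 for _, t in survivors if t > wanho)
-- ===== Notes on version B (the rewrite author's own statement) =====
-- stated objective: simpler
-- what changed: B keeps the Pareto sort but builds the survivor totals in that single elimination pass (returning -1 the moment employee 0 is eliminated) and computes Wanho's rank as 1 + a linear count of survivors with strictly greater total, dropping A's eliminated set, second membership pass, second sort and rank/same_rank bookkeeping loop.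
-- outside the precondition, e.g. on solution([]): A returns 0, B raises IndexError
import Mathlib
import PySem

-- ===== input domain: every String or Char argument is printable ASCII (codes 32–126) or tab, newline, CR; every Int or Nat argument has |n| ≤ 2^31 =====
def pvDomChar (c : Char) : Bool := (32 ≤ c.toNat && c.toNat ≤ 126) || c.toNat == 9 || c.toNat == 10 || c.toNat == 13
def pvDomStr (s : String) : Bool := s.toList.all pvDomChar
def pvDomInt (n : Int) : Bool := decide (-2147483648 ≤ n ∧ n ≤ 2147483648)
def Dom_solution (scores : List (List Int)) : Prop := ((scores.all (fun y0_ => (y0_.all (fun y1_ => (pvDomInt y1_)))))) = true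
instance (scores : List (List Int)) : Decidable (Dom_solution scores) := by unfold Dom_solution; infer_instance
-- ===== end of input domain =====

-- B keeps A's Pareto sort/elimination rule but builds the survivor totals in that same
-- pass (early -1) and ranks Wanho by one linear count of strictly greater totals,
-- dropping A's eliminated set, second pass, second sort and rank/same_rank loop (simpler).

-- ===== PORT A =====
-- A's final rank loop: state (rank, same_rank_count, prev_total), break at idx 0, answer 0 if never hit
def rankLoopA : List (Int × Int) → Int → Int → Option Int → Int
  | [], _, _, _ => 0
  | (idx, total) :: rest, rank, src, prev =>
      let rank' := if some total ≠ prev then rank + src + 1 else rank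
      let src'  := if some total ≠ prev then 0 else src + 1
      if idx = 0 then rank' else rankLoopA rest rank' src' (some total)

def solution (scores : List (List Int)) : Int :=
  let indexed := (PySem.List.enumerate scores 0).map
      (fun p => (p.1, PySem.List.pyGetD p.2 0 0, PySem.List.pyGetD p.2 1 0))
  let indexed := PySem.List.sorted2 indexed (fun x => -x.2.1) (fun x => x.2.2)
  let st := indexed.foldl
      (fun (st : Int × PySem.Set Int) t =>
        if t.2.2 < st.1 then (st.1, PySem.Set.add st.2 t.1) else (max st.1 t.2.2, st.2))
      (0, PySem.Set.empty)
  if PySem.Set.contains st.2 0 then -1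
  else
    let eligible := indexed.foldl
      (fun (acc : List (Int × Int)) t =>
        if PySem.Set.contains st.2 t.1 then acc else acc ++ [(t.1, t.2.1 + t.2.2)]) []
    let eligible := PySem.List.sorted eligible (fun x => -x.2) false
    rankLoopA eligible 0 0 none

-- ===== PORT B =====
-- B's single pass: early None (→ -1) when Wanho is eliminated, else the survivor totals
def altLoopB : List (Int × Int × Int) → Int → List (Int × Int) → Option (List (Int × Int))
  | [], _, surv => some surv
  | (idx, work, peer) :: rest, maxPeer, surv =>
      if peer < maxPeer then
        if idx = 0 then none else altLoopB rest maxPeer surv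
      else altLoopB rest (max maxPeer peer) (surv ++ [(idx, work + peer)])

def solution_alt (scores : List (List Int)) : Int :=
  let order := PySem.List.sorted2
      ((PySem.List.enumerate scores 0).map
        (fun p => (p.1, PySem.List.pyGetD p.2 0 0, PySem.List.pyGetD p.2 1 0)))
      (fun x => -x.2.1) (fun x => x.2.2)
  match altLoopB order 0 [] with
  | none => -1
  | some surv =>
      let wanho := PySem.List.pyGetD (PySem.List.pyGetD scores 0 []) 0 0
                 + PySem.List.pyGetD (PySem.List.pyGetD scores 0 []) 1 0
      1 + (surv.countP (fun x => wanho < x.2) : Int)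

-- ===== PRECONDITION & SPEC =====
-- Pre_ excludes the empty outer list, where A returns 0 although employee 0 (Wanho) does not
-- exist and B naturally raises IndexError, and inner lists shorter than 2, on which A raises IndexError.
def Pre_solution (scores : List (List Int)) : Prop :=
  scores ≠ [] ∧ ∀ s ∈ scores, 2 ≤ s.length
instance (scores : List (List Int)) : Decidable (Pre_solution scores) := by unfold Pre_solution; infer_instance

def pvWitness_solution : List (List Int) := [[4, 5], [3, 5], [2, 1]]

def Spec_solution (scores : List (List Int)) (out : Int) : Prop := out = solution_alt scores
instance (scores : List (List Int)) (out : Int) : Decidable (Spec_solution scores out) := by unfold Spec_solution; infer_instance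

-- ===== CLAIM (what is proved, stated in full; the proofs are below) =====
def Claim_equal_solution : Prop := ∀ (scores : List (List Int)), Dom_solution scores → Pre_solution scores → Spec_solution scores (solution scores)

-- ===== LEMMAS AND PROOFS =====

-- indices eliminated by the elimination pass, started at running max m
def badIdx : List (Int × Int × Int) → Int → List Int
  | [], _ => []
  | (i, _, p) :: rest, m => if p < m then i :: badIdx rest m else badIdx rest (max m p)

-- (index, total) pairs of the survivors of that pass
def goodPairs : List (Int × Int × Int) → Int → List (Int × Int)
  | [], _ => []
  | (i, w, p) :: rest, m => if p < m then goodPairs rest m else (i, w + p) :: goodPairs rest (max m p)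

-- final running max of that pass
def finMax : List (Int × Int × Int) → Int → Int
  | [], m => m
  | (_, _, p) :: rest, m => if p < m then finMax rest m else finMax rest (max m p)

lemma badIdx_subset_fst : ∀ (l : List (Int × Int × Int)) (m x), x ∈ badIdx l m → x ∈ l.map (·.1) := by
  intro l
  induction l with
  | nil => intro m x h; simp [badIdx] at h
  | cons t rest ih =>
    obtain ⟨i, w, p⟩ := t
    intro m x h
    simp only [badIdx] at h
    split at h
    · rcases List.mem_cons.mp h with h | h
      · simp [h]
      · simp only [List.map_cons, List.mem_cons]; right; exact ih m x h
    · simp only [List.map_cons, List.mem_cons]; right; exact ih _ x h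


lemma elim_fold (l : List (Int × Int × Int)) : ∀ (m : Int) (E : PySem.Set Int),
    (∀ t ∈ l, PySem.Set.contains E t.1 = false) → (l.map (·.1)).Nodup →
    l.foldl (fun (st : Int × PySem.Set Int) t =>
        if t.2.2 < st.1 then (st.1, PySem.Set.add st.2 t.1) else (max st.1 t.2.2, st.2)) (m, E)
      = (finMax l m, E ++ badIdx l m) := by
  induction l with
  | nil => intro m E _ _; simp [finMax, badIdx]
  | cons t rest ih =>
    obtain ⟨i, w, p⟩ := t
    intro m E hE hnd
    simp only [List.map_cons, List.nodup_cons] at hnd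
    obtain ⟨hi, hnd⟩ := hnd
    simp only [List.foldl_cons, finMax, badIdx]
    by_cases hc : p < m
    · have hadd : PySem.Set.add E i = E ++ [i] := by
        have h0 := hE (i, w, p) List.mem_cons_self
        simp only [PySem.Set.contains, List.contains_eq_mem, decide_eq_false_iff_not] at h0
        simp [PySem.Set.add, PySem.Set.contains, h0]
      simp only [hc, if_true, hadd]
      rw [ih m (E ++ [i]) ?_ hnd]
      · simp
      · intro t ht
        have h1 : PySem.Set.contains E t.1 = false := hE t (List.mem_cons_of_mem _ ht)
        have h2 : t.1 ≠ i := by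
          intro h; exact hi (h ▸ List.mem_map_of_mem ht)
        simp [PySem.Set.contains, List.contains_eq_mem] at h1 ⊢
        exact ⟨h1, h2⟩
    · simp only [hc, if_false]
      exact ih (max m p) E (fun t ht => hE t (List.mem_cons_of_mem _ ht)) hnd


lemma altLoopB_char : ∀ (l : List (Int × Int × Int)) (m : Int) (surv : List (Int × Int)),
    altLoopB l m surv = if 0 ∈ badIdx l m then none else some (surv ++ goodPairs l m) := by
  intro l
  induction l with
  | nil => intro m surv; simp [altLoopB, badIdx, goodPairs]
  | cons t rest ih =>
    obtain ⟨i, w, p⟩ := t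
    intro m surv
    simp only [altLoopB, badIdx, goodPairs]
    by_cases hc : p < m
    · simp only [hc, if_true]
      by_cases hi : i = 0
      · simp [hi]
      · simp [hi, ih, Ne.symm hi]
    · simp only [hc, if_false, ih, List.append_assoc]
      rfl


lemma eligible_fold (S : List Int) : ∀ (l : List (Int × Int × Int)) (m : Int) (acc : List (Int × Int)),
    (l.map (·.1)).Nodup →
    (∀ t ∈ l, (PySem.Set.contains S t.1 = true ↔ t.1 ∈ badIdx l m)) →
    l.foldl (fun (acc : List (Int × Int)) t =>
        if PySem.Set.contains S t.1 then acc else acc ++ [(t.1, t.2.1 + t.2.2)]) acc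
      = acc ++ goodPairs l m := by
  intro l
  induction l with
  | nil => intro m acc _ _; simp [goodPairs]
  | cons t rest ih =>
    obtain ⟨i, w, p⟩ := t
    intro m acc hnd hS
    simp only [List.map_cons, List.nodup_cons] at hnd
    obtain ⟨hi, hnd⟩ := hnd
    simp only [List.foldl_cons, goodPairs]
    by_cases hc : p < m
    · have hin : PySem.Set.contains S i = true := by
        refine (hS (i, w, p) List.mem_cons_self).mpr ?_
        simp [badIdx, hc]
      simp only [hin, if_true, hc, if_true]
      refine ih m acc hnd ?_
      intro t ht
      have := hS t (List.mem_cons_of_mem _ ht)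
      simp only [badIdx, hc, if_true, List.mem_cons] at this
      rw [this]
      have h2 : t.1 ≠ i := fun h => hi (h ▸ List.mem_map_of_mem ht)
      simp [h2]
    · have hout : PySem.Set.contains S i = false := by
        rw [Bool.eq_false_iff]
        intro h
        have hmem := (hS (i, w, p) List.mem_cons_self).mp h
        simp only [badIdx, hc, if_false] at hmem
        exact hi (badIdx_subset_fst rest (max m p) i hmem)
      simp only [hout, Bool.false_eq_true, if_false, hc]
      rw [ih (max m p) _ hnd ?_]
      · simp
      · intro t ht
        have := hS t (List.mem_cons_of_mem _ ht)
        simpa [badIdx, hc] using this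


lemma goodPairs_fst_sublist : ∀ (l : List (Int × Int × Int)) (m : Int),
    ((goodPairs l m).map (·.1)).Sublist (l.map (·.1)) := by
  intro l
  induction l with
  | nil => intro m; simp [goodPairs]
  | cons t rest ih =>
    obtain ⟨i, w, p⟩ := t
    intro m
    simp only [goodPairs]
    split
    · exact (ih m).trans (List.sublist_cons_self _ _)
    · simpa using (ih (max m p)).cons₂ i


lemma mem_goodPairs : ∀ (l : List (Int × Int × Int)) (m : Int) (t : Int × Int × Int),
    t ∈ l → t.1 ∉ badIdx l m → (t.1, t.2.1 + t.2.2) ∈ goodPairs l m := by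
  intro l
  induction l with
  | nil => intro m t h; simp at h
  | cons u rest ih =>
    obtain ⟨i, w, p⟩ := u
    intro m t hmem hnb
    simp only [badIdx] at hnb
    rcases List.mem_cons.mp hmem with rfl | hmem
    · by_cases hc : p < m
      · simp [hc] at hnb
      · simp [goodPairs, hc]
    · simp only [goodPairs]
      by_cases hc : p < m
      · simp only [hc, if_true] at hnb ⊢
        exact ih m t hmem (fun h => hnb (List.mem_cons_of_mem _ h))
      · simp only [hc, if_false] at hnb ⊢
        exact List.mem_cons_of_mem _ (ih (max m p) t hmem hnb)


lemma rankLoopA_char (T : Int) : ∀ (r : List (Int × Int)) (rank src p : Int),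
    r.Pairwise (fun a b => b.2 ≤ a.2) → (∀ t ∈ r, t.2 ≤ p) →
    (0, T) ∈ r → (∀ t ∈ r, t.1 = 0 → t.2 = T) →
    rankLoopA r rank src (some p)
      = rank + (if T = p then 0 else src + 1) + (r.countP (fun x => T < x.2) : Int) := by
  intro r
  induction r with
  | nil => intro rank src p _ _ hm; simp at hm
  | cons u rest ih =>
    obtain ⟨i, t⟩ := u
    intro rank src p hpw hle hm hu
    have htp : t ≤ p := hle (i, t) List.mem_cons_self
    have hrest_le : ∀ x ∈ rest, x.2 ≤ t := by
      intro x hx; exact (List.pairwise_cons.mp hpw).1 x hx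
    have hpw' := (List.pairwise_cons.mp hpw).2
    simp only [rankLoopA]
    by_cases hi : i = 0
    · -- head is Wanho: t = T
      have ht : t = T := hu (i, t) List.mem_cons_self hi
      subst ht
      have hcnt : rest.countP (fun x => t < x.2) = 0 := by
        rw [List.countP_eq_zero]
        intro x hx
        simp only [decide_eq_true_eq]
        exact not_lt.mpr (hrest_le x hx)
      simp only [hi, if_true, List.countP_cons]
      by_cases he : t = p
      · subst he; simp [hcnt]
      · have : (some t ≠ some p) := by simpa using he
        simp [this, he, hcnt]
        ring
    · -- head is not Wanho
      have hm' : (0, T) ∈ rest := by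
        rcases List.mem_cons.mp hm with h | h
        · exact absurd (congrArg Prod.fst h).symm hi
        · exact h
      have hTle : T ≤ t := hrest_le (0, T) hm'
      have hu' : ∀ x ∈ rest, x.1 = 0 → x.2 = T := fun x hx => hu x (List.mem_cons_of_mem _ hx)
      simp only [hi, if_false]
      by_cases he : t = p
      · subst he
        have hne : ¬ (some t ≠ some t) := by simp
        simp only [hne, if_false]
        rw [ih rank (src + 1) t hpw' hrest_le hm' hu']
        simp only [List.countP_cons, decide_eq_true_eq]
        by_cases hT : T = t
        · simp [hT]
        · have hTlt : T < t := lt_of_le_of_ne hTle hT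
          simp [hT, hTlt]
          ring
      · have hne : (some t ≠ some p) := by simpa using he
        rw [if_pos hne, if_pos hne]
        rw [ih (rank + src + 1) 0 t hpw' hrest_le hm' hu']
        have hTp : T ≠ p := fun h => he (le_antisymm htp (h ▸ hTle))
        simp only [List.countP_cons, decide_eq_true_eq, hTp, if_false]
        by_cases hT : T = t
        · simp [hT]; ring
        · have hTlt : T < t := lt_of_le_of_ne hTle hT
          simp [hT, hTlt]
          ring


lemma rankLoopA_top (T : Int) (r : List (Int × Int))
    (hp : r.Pairwise (fun a b => b.2 ≤ a.2))
    (hm : (0, T) ∈ r) (hu : ∀ t ∈ r, t.1 = 0 → t.2 = T) :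
    rankLoopA r 0 0 none = 1 + (r.countP (fun x => T < x.2) : Int) := by
  match r, hm with
  | (i, t) :: rest, hm =>
    have hrest_le : ∀ x ∈ rest, x.2 ≤ t := fun x hx => (List.pairwise_cons.mp hp).1 x hx
    have hpw' := (List.pairwise_cons.mp hp).2
    simp only [rankLoopA, reduceCtorEq, ne_eq, not_false_eq_true, if_true]
    by_cases hi : i = 0
    · have ht : t = T := hu (i, t) List.mem_cons_self hi
      subst ht
      have hcnt : rest.countP (fun x => t < x.2) = 0 := by
        rw [List.countP_eq_zero]
        intro x hx
        simp only [decide_eq_true_eq]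
        exact not_lt.mpr (hrest_le x hx)
      simp [hi, hcnt]
    · have hm' : (0, T) ∈ rest := by
        rcases List.mem_cons.mp hm with h | h
        · exact absurd (congrArg Prod.fst h).symm hi
        · exact h
      have hTle : T ≤ t := hrest_le (0, T) hm'
      have hu' : ∀ x ∈ rest, x.1 = 0 → x.2 = T := fun x hx => hu x (List.mem_cons_of_mem _ hx)
      simp only [hi, if_false]
      rw [rankLoopA_char T rest (0 + 0 + 1) 0 t hpw' hrest_le hm' hu']
      simp only [List.countP_cons, decide_eq_true_eq]
      by_cases hT : T = t
      · simp [hT]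
      · have hTlt : T < t := lt_of_le_of_ne hTle hT
        simp [hT, hTlt]
        ring


lemma eq_of_fst_nodup {l : List (Int × Int)} (h : (l.map (·.1)).Nodup)
    {a b : Int × Int} (ha : a ∈ l) (hb : b ∈ l) (hfst : a.1 = b.1) : a = b := by
  have := List.inj_on_of_nodup_map h ha hb hfst
  exact this


-- ===== VERDICT (by name: the statement is the Claim_ definition above) =====
theorem solution_spec : Claim_equal_solution := by
  intro scores _ hpre
  obtain ⟨hne, -⟩ := hpre
  obtain ⟨s, rest, rfl⟩ : ∃ s rest, scores = s :: rest := by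
    cases scores with
    | nil => exact absurd rfl hne
    | cons a b => exact ⟨a, b, rfl⟩
  unfold Spec_solution
  simp only [solution, solution_alt]
  set tri := (PySem.List.enumerate (s :: rest) 0).map
      (fun p => (p.1, PySem.List.pyGetD p.2 0 0, PySem.List.pyGetD p.2 1 0)) with htri
  set L := PySem.List.sorted2 tri (fun x => -x.2.1) (fun x => x.2.2) with hL
  have hperm : L.Perm tri := PySem.List.sorted2_perm tri _ _ false
  have hnodup : (L.map (·.1)).Nodup := by
    have h1 : (L.map (·.1)).Perm (tri.map (·.1)) := hperm.map _
    have h2 : tri.map (·.1) = PySem.List.pyRange 0 (0 + ((s :: rest : List (List Int))).length) := by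
      rw [htri, List.map_map]
      exact PySem.List.map_fst_enumerate _ _
    rw [h1.nodup_iff, h2]
    exact PySem.List.nodup_pyRange_one _ _
  have hgd : PySem.List.pyGetD ((s :: rest : List (List Int))) 0 [] = s := by
    simp [PySem.List.pyGetD, PySem.List.pyGet?, PySem.List.pyIdx?]
  set w0 := PySem.List.pyGetD s 0 0 with hw0
  set p0 := PySem.List.pyGetD s 1 0 with hp0
  have hmem0 : ((0 : Int), w0, p0) ∈ L := by
    rw [hperm.mem_iff, htri]
    refine List.mem_map.mpr ⟨(0, s), ?_, rfl⟩
    rw [PySem.List.enumerate_cons]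
    exact List.mem_cons_self
  have hElim := elim_fold L 0 PySem.Set.empty
    (by intro t _; simp [PySem.Set.empty, PySem.Set.contains]) hnodup
  rw [hElim]
  rw [altLoopB_char]
  by_cases hbad : (0 : Int) ∈ badIdx L 0
  · have hc : PySem.Set.contains ((PySem.Set.empty : PySem.Set Int) ++ badIdx L 0) (0 : Int) = true := by
      simp [PySem.Set.contains, List.contains_eq_mem, PySem.Set.empty, hbad]
    simp [hbad]
  · have hc : PySem.Set.contains ((PySem.Set.empty : PySem.Set Int) ++ badIdx L 0) (0 : Int) = false := by
      simp [PySem.Set.contains, List.contains_eq_mem, PySem.Set.empty, hbad]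
    simp only [hc, Bool.false_eq_true, if_false, hbad]
    have hES : PySem.Set.empty ++ badIdx L 0 = badIdx L 0 := by simp [PySem.Set.empty]
    rw [hES]
    rw [eligible_fold (badIdx L 0) L 0 [] hnodup
      (by intro t _; simp [PySem.Set.contains, List.contains_eq_mem])]
    set G := goodPairs L 0 with hG
    set T := w0 + p0 with hT
    have hGnod : (G.map (·.1)).Nodup := (goodPairs_fst_sublist L 0).nodup hnodup
    have hmemG : ((0 : Int), T) ∈ G := mem_goodPairs L 0 (0, w0, p0) hmem0 hbad
    have hpwR : (PySem.List.sorted ([] ++ G) (fun x => -x.2) false).Pairwise (fun a b => b.2 ≤ a.2) := by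
      refine (PySem.List.sorted_pairwise ([] ++ G) (fun x => -x.2)).imp ?_
      intro a b h
      omega
    have hmemR : ((0 : Int), T) ∈ PySem.List.sorted ([] ++ G) (fun x => -x.2) false := by
      rw [PySem.List.mem_sorted]
      simpa using hmemG
    have huR : ∀ x ∈ PySem.List.sorted ([] ++ G) (fun x => -x.2) false, x.1 = 0 → x.2 = T := by
      intro x hx h0
      have hxG : x ∈ G := by
        have := (PySem.List.mem_sorted _ _ _ _).mp hx
        simpa using this
      have hx2 := eq_of_fst_nodup hGnod hxG hmemG (by simpa using h0)
      rw [hx2]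
    rw [rankLoopA_top T _ hpwR hmemR huR]
    have hpermG : (PySem.List.sorted ([] ++ G) (fun x => -x.2) false).Perm G := by
      simpa using PySem.List.sorted_perm ([] ++ G) (fun x => -x.2) false
    have hcnt : (PySem.List.sorted ([] ++ G) (fun x => -x.2) false).countP (fun x => T < x.2)
        = G.countP (fun x => T < x.2) := hpermG.countP_eq _
    rw [hcnt, hgd, ← hw0, ← hp0, ← hT]
    simp
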